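-- pv_equiv track=rewrite | github.com/Ayu-hack/GeeksforGeeks-POTD-Solution | October 2024/Modify the Array(oct 24).py | modifyAndRearrangeArr
-- ===== SOURCE A (Python) =====
-- def modifyAndRearrangeArr(arr):
--     n = len(arr)
--     for i in range(n - 1):
--         if arr[i] != 0 and arr[i] == arr[i + 1]:
--             arr[i] = arr[i] * 2
--             arr[i + 1] = 0
--     result = []
--     for num in arr:
--         if num != 0:
--             result.append(num)
--     result.extend([0] * (n - len(result)))
--     for i in range(n):
--         arr[i] = result[i]
--
--     return arr
-- ===== SOURCE B (Python) =====
-- def modifyAndRearrangeArr(arr):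
--     n = len(arr)
--     res = []
--     i = 0
--     while i < n:
--         x = arr[i]
--         if x != 0 and i + 1 < n and x == arr[i + 1]:
--             res.append(2 * x)
--             i += 2
--         elif x != 0:
--             res.append(x)
--             i += 1
--         else:
--             i += 1
--     res.extend([0] * (n - len(res)))
--     arr[:] = res
--     return arr
-- ===== Notes on version B (the rewrite author's own statement) =====
-- stated objective: simpler
-- what changed: Replaced A's three sequential passes (in-place adjacent merge with partner-zeroing, nonzero collection, copy-back) by a single left-to-right scan that merges a nonzero pair by emitting 2*x and skipping both elements, then pads with zeros.
import Mathlib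
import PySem

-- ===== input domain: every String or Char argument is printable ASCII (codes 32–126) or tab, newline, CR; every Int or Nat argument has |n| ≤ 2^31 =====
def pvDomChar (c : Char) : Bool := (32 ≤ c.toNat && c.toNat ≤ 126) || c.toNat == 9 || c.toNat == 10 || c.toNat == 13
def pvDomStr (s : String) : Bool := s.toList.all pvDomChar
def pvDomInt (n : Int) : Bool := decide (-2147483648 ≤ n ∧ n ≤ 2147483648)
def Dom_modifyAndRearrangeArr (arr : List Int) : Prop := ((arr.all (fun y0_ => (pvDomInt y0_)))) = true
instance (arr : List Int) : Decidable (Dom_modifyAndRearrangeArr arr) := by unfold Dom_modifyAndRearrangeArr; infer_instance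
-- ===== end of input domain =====

-- B fuses A's merge pass and zero-moving pass into one left-to-right scan (simpler, one traversal);
-- both Pythons mutate `arr` in place to the same final contents and return it — the theorem is about the return value.


-- ===== PORT A =====
-- one iteration of A's first loop; arr[i] / arr[i+1] are always in range (i < n-1), so getD is exact
def pvStepA (a : List Int) (i : Nat) : List Int :=
  let x := a.getD i 0
  let y := a.getD (i + 1) 0
  if x ≠ 0 ∧ x = y then (a.set i (x * 2)).set (i + 1) 0 else a

def modifyAndRearrangeArr (arr : List Int) : List Int :=
  let n := arr.length
  let a1 := (List.range (n - 1)).foldl pvStepA arr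
  let result := a1.foldl (fun r num => if num ≠ 0 then r ++ [num] else r) ([] : List Int)
  let result2 := result ++ List.replicate (n - result.length) 0
  -- final copy loop: arr[i] = result[i]; result has length n, so getD is exact
  (List.range n).foldl (fun a i => a.set i (result2.getD i 0)) a1

-- ===== PORT B =====
-- B's while loop over the index, as the corresponding recursion on what remains of the list
def pvScanB : List Int → List Int
  | [] => []
  | [x] => if x ≠ 0 then [x] else []
  | x :: y :: rest =>
    if x ≠ 0 ∧ x = y then 2 * x :: pvScanB rest
    else if x ≠ 0 then x :: pvScanB (y :: rest)
    else pvScanB (y :: rest)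

def modifyAndRearrangeArr_alt (arr : List Int) : List Int :=
  let res := pvScanB arr
  res ++ List.replicate (arr.length - res.length) 0

-- ===== PRECONDITION & SPEC =====
def Spec_modifyAndRearrangeArr (arr : List Int) (out : List Int) : Prop := out = modifyAndRearrangeArr_alt arr
instance (arr : List Int) (out : List Int) : Decidable (Spec_modifyAndRearrangeArr arr out) := by unfold Spec_modifyAndRearrangeArr; infer_instance

-- ===== CLAIM (what is proved, stated in full; the proofs are below) =====
def Claim_equal_modifyAndRearrangeArr : Prop := ∀ (arr : List Int), Dom_modifyAndRearrangeArr arr → Spec_modifyAndRearrangeArr arr (modifyAndRearrangeArr arr)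

-- ===== LEMMAS AND PROOFS =====

-- the outcome of A's first (in-place merging) pass, written as a recursion on the list
def pvMerge : List Int → List Int
  | [] => []
  | [x] => [x]
  | x :: y :: rest =>
    if x ≠ 0 ∧ x = y then x * 2 :: 0 :: pvMerge rest else x :: pvMerge (y :: rest)

lemma pvMerge_cons2 (x y : Int) (rest : List Int) :
    pvMerge (x :: y :: rest)
      = if x ≠ 0 ∧ x = y then x * 2 :: 0 :: pvMerge rest else x :: pvMerge (y :: rest) := rfl

lemma pvScanB_cons2 (x y : Int) (rest : List Int) :
    pvScanB (x :: y :: rest)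
      = if x ≠ 0 ∧ x = y then 2 * x :: pvScanB rest
        else if x ≠ 0 then x :: pvScanB (y :: rest) else pvScanB (y :: rest) := rfl

lemma pvMerge_length_aux : ∀ (n : Nat) (a : List Int), a.length ≤ n →
    (pvMerge a).length = a.length := by
  intro n
  induction n with
  | zero =>
    intro a ha
    have : a = [] := List.eq_nil_of_length_eq_zero (Nat.le_zero.mp ha)
    subst this; rfl
  | succ n ih =>
    intro a ha
    match a with
    | [] => rfl
    | [x] => rfl
    | x :: y :: rest =>
      have hlen : (x :: y :: rest).length = rest.length + 2 := by simp
      rw [hlen] at ha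
      rw [pvMerge_cons2]
      split_ifs with hc
      · have := ih rest (by omega)
        simp [this]
      · have := ih (y :: rest) (by simp; omega)
        simp at this
        simp [this]

lemma pvMerge_length (a : List Int) : (pvMerge a).length = a.length :=
  pvMerge_length_aux a.length a (le_refl _)

-- shifting an index-driven fold past a fixed head element
lemma foldl_map_succ (f g : List Int → Nat → List Int)
    (h : ∀ (s : List Int) (c : Int) (i : Nat), f (c :: s) (i + 1) = c :: g s i) :
    ∀ (idxs : List Nat) (c : Int) (a : List Int),
      (idxs.map (· + 1)).foldl f (c :: a) = c :: idxs.foldl g a := by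
  intro idxs
  induction idxs with
  | nil => intro c a; simp
  | cons i is ih => intro c a; simp [List.foldl_cons, h, ih]

lemma pvStepA_cons (s : List Int) (c : Int) (i : Nat) :
    pvStepA (c :: s) (i + 1) = c :: pvStepA s i := by
  simp only [pvStepA, List.getD_cons_succ]
  split_ifs with h
  · simp [List.set_cons_succ]
  · rfl

lemma range_succ_shift (k : Nat) :
    List.range (k + 1) = 0 :: (List.range k).map (· + 1) := by
  rw [List.range_succ_eq_map]

lemma phase1_eq_aux : ∀ (n : Nat) (a : List Int), a.length ≤ n →
    (List.range (a.length - 1)).foldl pvStepA a = pvMerge a := by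
  intro n
  induction n with
  | zero =>
    intro a ha
    have : a = [] := List.eq_nil_of_length_eq_zero (Nat.le_zero.mp ha)
    subst this; rfl
  | succ n ih =>
    intro a ha
    match a with
    | [] => rfl
    | [x] => rfl
    | x :: y :: rest =>
      have hlen : (x :: y :: rest).length - 1 = rest.length + 1 := by simp
      have hlen2 : (x :: y :: rest).length = rest.length + 2 := by simp
      rw [hlen2] at ha
      rw [hlen, range_succ_shift, List.foldl_cons]
      by_cases hc : x ≠ 0 ∧ x = y
      · -- merge at the head: the list becomes x*2 :: 0 :: rest
        have hstep : pvStepA (x :: y :: rest) 0 = x * 2 :: 0 :: rest := by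
          simp only [pvStepA, List.getD_cons_zero, List.getD_cons_succ]
          rw [if_pos hc]
          rfl
        rw [hstep, foldl_map_succ pvStepA pvStepA pvStepA_cons]
        -- the freshly written 0 blocks the next comparison
        have hzero : (List.range rest.length).foldl pvStepA (0 :: rest)
            = 0 :: pvMerge rest := by
          match rest with
          | [] => rfl
          | z :: rs =>
            have : (z :: rs).length = rs.length + 1 := by simp
            rw [this, range_succ_shift, List.foldl_cons]
            have hstep0 : pvStepA (0 :: z :: rs) 0 = 0 :: z :: rs := by
              simp [pvStepA]
            rw [hstep0, foldl_map_succ pvStepA pvStepA pvStepA_cons]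
            have hrec := ih (z :: rs) (by simp; omega)
            have hl : (z :: rs).length - 1 = rs.length := by simp
            rw [hl] at hrec
            rw [hrec]
        rw [hzero, pvMerge_cons2, if_pos hc]
      · have hstep : pvStepA (x :: y :: rest) 0 = x :: y :: rest := by
          simp only [pvStepA, List.getD_cons_zero, List.getD_cons_succ]
          exact if_neg hc
        rw [hstep, foldl_map_succ pvStepA pvStepA pvStepA_cons]
        have hrec := ih (y :: rest) (by simp; omega)
        have hl : (y :: rest).length - 1 = rest.length := by simp
        rw [hl] at hrec
        rw [hrec, pvMerge_cons2, if_neg hc]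

lemma filter_merge_aux : ∀ (n : Nat) (a : List Int), a.length ≤ n →
    (pvMerge a).filter (fun num => decide (num ≠ 0)) = pvScanB a := by
  intro n
  induction n with
  | zero =>
    intro a ha
    have : a = [] := List.eq_nil_of_length_eq_zero (Nat.le_zero.mp ha)
    subst this; rfl
  | succ n ih =>
    intro a ha
    match a with
    | [] => rfl
    | [x] =>
      by_cases hx : x = 0 <;> simp [pvMerge, pvScanB, hx]
    | x :: y :: rest =>
      have hlen2 : (x :: y :: rest).length = rest.length + 2 := by simp
      rw [hlen2] at ha
      rw [pvMerge_cons2, pvScanB_cons2]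
      by_cases hc : x ≠ 0 ∧ x = y
      · have h2x : x * 2 ≠ 0 := by
          intro hz
          rcases mul_eq_zero.mp hz with h1 | h1
          · exact hc.1 h1
          · norm_num at h1
        have hrec := ih rest (by omega)
        simp only [ne_eq, decide_not] at hrec
        rw [if_pos hc, if_pos hc]
        simp only [List.filter_cons]
        simp [h2x, hrec, mul_comm]
      · have hrec := ih (y :: rest) (by simp; omega)
        simp only [ne_eq, decide_not] at hrec
        rw [if_neg hc, if_neg hc]
        by_cases hx : x = 0
        · simp only [List.filter_cons]
          simp [hx, hrec]
        · simp only [List.filter_cons]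
          simp [hx, hrec]

lemma scan_length_le (a : List Int) : (pvScanB a).length ≤ a.length := by
  rw [← filter_merge_aux a.length a (le_refl _)]
  calc ((pvMerge a).filter (fun num => decide (num ≠ 0))).length
      ≤ (pvMerge a).length := List.length_filter_le _ _
    _ = a.length := pvMerge_length a

-- the final copy-back loop rebuilds exactly `b` when `a` has the same length
lemma copy_loop_eq : ∀ (b a : List Int), a.length = b.length →
    (List.range b.length).foldl (fun s i => s.set i (b.getD i 0)) a = b := by
  intro b
  induction b with
  | nil => intro a ha; simp [List.eq_nil_of_length_eq_zero ha]
  | cons hb tb ih =>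
    intro a ha
    match a with
    | [] => simp at ha
    | ha' :: ta =>
      rw [List.length_cons, range_succ_shift, List.foldl_cons]
      have hstep : (ha' :: ta).set 0 ((hb :: tb).getD 0 0) = hb :: ta := by simp
      have hshift : ∀ (s : List Int) (c : Int) (i : Nat),
          (fun (s : List Int) i => s.set i ((hb :: tb).getD i 0)) (c :: s) (i + 1)
            = c :: (fun (s : List Int) i => s.set i (tb.getD i 0)) s i := by
        intro s c i; simp [List.set_cons_succ]
      rw [hstep, foldl_map_succ _ _ hshift]
      have := ih ta (by simpa using ha)
      rw [this]

-- ===== VERDICT (by name: the statement is the Claim_ definition above) =====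
theorem modifyAndRearrangeArr_spec : Claim_equal_modifyAndRearrangeArr := by
  intro arr _
  unfold Spec_modifyAndRearrangeArr modifyAndRearrangeArr modifyAndRearrangeArr_alt
  simp only []
  rw [phase1_eq_aux arr.length arr (le_refl _)]
  rw [PySem.List.foldl_append_ite_eq_filter]
  rw [List.nil_append, filter_merge_aux arr.length arr (le_refl _)]
  have hresle : (pvScanB arr).length ≤ arr.length := scan_length_le arr
  have hlen2 : (pvScanB arr ++ List.replicate (arr.length - (pvScanB arr).length) 0).length
      = arr.length := by simp; omega
  have hab : (pvMerge arr).length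
      = (pvScanB arr ++ List.replicate (arr.length - (pvScanB arr).length) 0).length := by
    rw [hlen2, pvMerge_length]
  rw [show List.range arr.length
      = List.range (pvScanB arr ++ List.replicate (arr.length - (pvScanB arr).length) 0).length
      from by rw [hlen2]]
  exact copy_loop_eq _ _ hab
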